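-- pv_equiv track=rewrite | github.com/MestreAlex/custo_valor | salvar_jogo.py | _normalizar_ids
-- ===== SOURCE A (Python) =====
-- def _normalizar_ids(jogos_salvos):
--     """Garante IDs unicos e sequenciais para jogos salvos."""
--     ids = [j.get('id', None) for j in jogos_salvos]
--     ids_validos = [i for i in ids if isinstance(i, int)]
--     if len(ids_validos) != len(ids) or len(set(ids_validos)) != len(ids_validos):
--         for novo_id, jogo in enumerate(jogos_salvos):
--             jogo['id'] = novo_id
--         return True
--     return False
-- ===== SOURCE B (Python) =====
-- def _normalizar_ids(jogos_salvos):
--     """Garante IDs unicos e sequenciais para jogos salvos."""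
--     ids = sorted(j.get('id') for j in jogos_salvos
--                  if isinstance(j.get('id'), int))
--     if len(ids) == len(jogos_salvos) and all(a < b for a, b in zip(ids, ids[1:])):
--         return False
--     for novo_id, jogo in enumerate(jogos_salvos):
--         jogo['id'] = novo_id
--     return True
-- ===== Notes on version B (the rewrite author's own statement) =====
-- stated objective: alternative
-- what changed: Replaces A's hash-set cardinality test (len(set(valid_ids)) vs len) by a sort-then-scan: the valid int ids are sorted and the list passes iff it has one id per game and the sorted sequence is strictly increasing (a duplicate shows up as a non-strict adjacent pair).
import Mathlib
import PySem

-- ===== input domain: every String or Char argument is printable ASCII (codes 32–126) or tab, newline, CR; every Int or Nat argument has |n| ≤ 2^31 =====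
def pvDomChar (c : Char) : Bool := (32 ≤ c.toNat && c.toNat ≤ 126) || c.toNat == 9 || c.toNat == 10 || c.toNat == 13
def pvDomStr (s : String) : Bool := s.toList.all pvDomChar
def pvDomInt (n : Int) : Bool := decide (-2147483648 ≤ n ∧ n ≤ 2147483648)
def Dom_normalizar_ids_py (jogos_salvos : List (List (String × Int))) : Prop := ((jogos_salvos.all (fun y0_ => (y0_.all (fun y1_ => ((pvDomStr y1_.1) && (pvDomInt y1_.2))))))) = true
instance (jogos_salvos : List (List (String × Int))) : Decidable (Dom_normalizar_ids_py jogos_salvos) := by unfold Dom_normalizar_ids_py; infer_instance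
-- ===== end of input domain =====

-- B replaces A's hash-set cardinality test by sort-then-scan over the valid ids; equivalence is
-- about the RETURN value only (both Pythons perform the same in-place id reassignment on True).

-- ===== PORT A =====
-- j.get('id', None): first-match lookup in the dict (values are Int, so an int is found iff the key is present)
def normalizar_ids_py (jogos_salvos : List (List (String × Int))) : Bool :=
  let ids : List (Option Int) := jogos_salvos.map (fun j => (PySem.Dict.mk j).get? "id")
  -- [i for i in ids if isinstance(i, int)]: keeps exactly the non-None entries, unwrapped
  let ids_validos : List Int := ids.filterMap (fun i => i)
  if ids_validos.length ≠ ids.length ∨ (PySem.Set.ofList ids_validos).length ≠ ids_validos.length then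
    -- (the enumerate loop only mutates the dicts in place; return value is True)
    true
  else false

-- ===== PORT B =====
def normalizar_ids_py_alt (jogos_salvos : List (List (String × Int))) : Bool :=
  -- sorted(j.get('id') for j in jogos_salvos if isinstance(j.get('id'), int))
  let ids : List Int :=
    PySem.List.sorted (jogos_salvos.filterMap (fun j => (PySem.Dict.mk j).get? "id")) (fun x => x) false
  -- len(ids) == len(jogos_salvos) and all(a < b for a, b in zip(ids, ids[1:]))
  if ids.length = jogos_salvos.length ∧ (ids.zip (ids.drop 1)).all (fun p => p.1 < p.2) then
    false
  else
    -- (the enumerate loop only mutates the dicts in place; return value is True)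
    true

-- ===== PRECONDITION & SPEC =====
def Spec_normalizar_ids_py (jogos_salvos : List (List (String × Int))) (out : Bool) : Prop := out = normalizar_ids_py_alt jogos_salvos
instance (jogos_salvos : List (List (String × Int))) (out : Bool) : Decidable (Spec_normalizar_ids_py jogos_salvos out) := by unfold Spec_normalizar_ids_py; infer_instance

-- ===== CLAIM (what is proved, stated in full; the proofs are below) =====
def Claim_equal_normalizar_ids_py : Prop := ∀ (jogos_salvos : List (List (String × Int))), Dom_normalizar_ids_py jogos_salvos → Spec_normalizar_ids_py jogos_salvos (normalizar_ids_py jogos_salvos)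

-- ===== LEMMAS AND PROOFS =====

-- |set(v)| = |v| exactly when v has no duplicates
theorem pv_length_ofList_eq_iff {v : List Int} :
    (PySem.Set.ofList v).length = v.length ↔ v.Nodup := by
  constructor
  · intro h
    induction v with
    | nil => exact List.nodup_nil
    | cons a v ih =>
      rw [PySem.Set.ofList_cons] at h
      by_cases ha : a ∈ v
      · exfalso
        have hmem : a ∈ PySem.Set.ofList v := (PySem.Set.mem_ofList v a).mpr ha
        have hlt : ((PySem.Set.ofList v).discard a).length < (PySem.Set.ofList v).length := by
          unfold PySem.Set.discard
          refine List.length_filter_lt_length_iff_exists.mpr ⟨a, hmem, by simp⟩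
        have hle := PySem.Set.length_ofList_le v
        simp only [List.length_cons] at h
        omega
      · have heq : (PySem.Set.ofList v).discard a = PySem.Set.ofList v := by
          unfold PySem.Set.discard
          refine List.filter_eq_self.mpr ?_
          intro x hx
          have : x ∈ v := (PySem.Set.mem_ofList v x).mp hx
          simp only [ne_eq, Bool.not_eq_eq_eq_not, Bool.not_true, beq_eq_false_iff_ne]
          rintro rfl; exact ha this
        rw [heq] at h
        simp only [List.length_cons] at h
        exact List.nodup_cons.mpr ⟨ha, ih (by omega)⟩
  · intro h
    rw [PySem.Set.ofList_eq_self_of_nodup v h]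

-- the adjacent-pairs scan of B is the chain of < on the list
theorem pv_zip_all_lt_iff_chain' (l : List Int) :
    ((l.zip (l.drop 1)).all (fun p => decide (p.1 < p.2)) = true) ↔ l.IsChain (· < ·) := by
  induction l with
  | nil => simp
  | cons a t ih =>
    cases t with
    | nil => simp
    | cons b t' =>
      simp only [List.drop_succ_cons, List.drop_zero, List.zip_cons_cons, List.all_cons,
        Bool.and_eq_true, decide_eq_true_eq, List.isChain_cons_cons]
      have heq : ((b :: t').zip ((b :: t').drop 1)) = ((b :: t').zip t') := by simp
      rw [← heq]
      exact and_congr Iff.rfl ih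

-- a ≤-sorted list is strictly increasing pairwise iff it has no duplicates
theorem pv_pairwise_lt_iff_nodup {l : List Int} (hs : l.Pairwise (· ≤ ·)) :
    l.Pairwise (· < ·) ↔ l.Nodup := by
  constructor
  · intro h; exact h.imp (fun hab => ne_of_lt hab)
  · intro h
    exact (hs.and h).imp (fun ⟨hle, hne⟩ => lt_of_le_of_ne hle hne)

theorem pvPorts_agree (js : List (List (String × Int))) :
    normalizar_ids_py js = normalizar_ids_py_alt js := by
  have key : (js.map (fun j => (PySem.Dict.mk j).get? "id")).filterMap (fun i => i)
      = js.filterMap (fun j => (PySem.Dict.mk j).get? "id") := by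
    simp [List.filterMap_map]
  set vids := js.filterMap (fun j => (PySem.Dict.mk j).get? "id") with hvids
  have hA : normalizar_ids_py js = false ↔
      (vids.length = js.length ∧ vids.Nodup) := by
    unfold normalizar_ids_py
    dsimp only
    rw [key]
    have hmaplen : (js.map (fun j => (PySem.Dict.mk j).get? "id")).length = js.length := by simp
    rw [hmaplen]
    split_ifs with h
    · simp only [false_iff]
      rintro ⟨h1, h2⟩
      rcases h with h | h
      · exact h h1
      · exact h (pv_length_ofList_eq_iff.mpr h2)
    · rw [not_or, not_not, not_not] at h
      simp only [true_iff]
      exact ⟨h.1, pv_length_ofList_eq_iff.mp h.2⟩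
  have hB : normalizar_ids_py_alt js = false ↔
      (vids.length = js.length ∧ vids.Nodup) := by
    unfold normalizar_ids_py_alt
    dsimp only
    rw [← hvids]
    set s := PySem.List.sorted vids (fun x => x) false with hs
    have hperm : s.Perm vids := PySem.List.sorted_perm vids (fun x => x) false
    have hlen : s.length = vids.length := hperm.length_eq
    have hsorted : s.Pairwise (· ≤ ·) := by
      have := PySem.List.sorted_pairwise vids (fun x => x)
      simpa using this
    split_ifs with h
    · obtain ⟨h1, h2⟩ := h
      have hchain : s.IsChain (· < ·) := (pv_zip_all_lt_iff_chain' s).mp (by simpa using h2)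
      have hpw : s.Pairwise (· < ·) := List.isChain_iff_pairwise.mp hchain
      exact iff_of_true rfl
        ⟨by omega, hperm.nodup_iff.mp ((pv_pairwise_lt_iff_nodup hsorted).mp hpw)⟩
    · refine iff_of_false (by simp) ?_
      rintro ⟨h1, h2⟩
      apply h
      have hnodup : s.Nodup := hperm.nodup_iff.mpr h2
      have hpw : s.Pairwise (· < ·) := (pv_pairwise_lt_iff_nodup hsorted).mpr hnodup
      have hchain : s.IsChain (· < ·) := List.isChain_iff_pairwise.mpr hpw
      exact ⟨by omega, by simpa using (pv_zip_all_lt_iff_chain' s).mpr hchain⟩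
  have := hA.trans hB.symm
  cases h1 : normalizar_ids_py js <;> cases h2 : normalizar_ids_py_alt js <;> simp_all

-- ===== VERDICT (by name: the statement is the Claim_ definition above) =====
theorem normalizar_ids_py_spec : Claim_equal_normalizar_ids_py := by
  intro js _
  unfold Spec_normalizar_ids_py
  exact pvPorts_agree js
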